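-- pv_equiv track=rewrite | github.com/takemi853/locus | scripts/reindex.py | _compute_colinks
-- ===== SOURCE A (Python) =====
-- def _compute_colinks(
--     article_links: dict[str, set[str]], min_shared: int = 2, top_n: int = 30
-- ) -> list[tuple[str, str, int, list[str]]]:
--     """min_shared 以上の共通リンクを持つ記事ペアを返す（多い順）。"""
--     slugs = list(article_links.keys())
--     pairs = []
--     for i, a in enumerate(slugs):
--         for b in slugs[i + 1:]:
--             intersection = article_links[a] & article_links[b]
--             if len(intersection) >= min_shared:
--                 pairs.append((a, b, len(intersection), sorted(intersection)))
--     return sorted(pairs, key=lambda x: x[2], reverse=True)[:top_n]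
-- ===== SOURCE B (Python) =====
-- def _compute_colinks(
--     article_links: dict[str, set[str]], min_shared: int = 2, top_n: int = 30
-- ) -> list[tuple[str, str, int, list[str]]]:
--     """Pre-sort each article's links once; the shared links of a pair are a
--     membership filter of the first article's sorted list, so no per-pair set
--     intersection or per-pair sort is built; pairs come from peeling the first
--     remaining article off the prepared list (kept reversed so the peel is O(1))."""
--     prepared = [(slug, sorted(links), links) for slug, links in article_links.items()]
--     prepared.reverse()
--     pairs = []
--     while prepared:
--         a, sa, _ = prepared.pop()
--         for b, _, tb in reversed(prepared):
--             common = [link for link in sa if link in tb]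
--             if len(common) >= min_shared:
--                 pairs.append((a, b, len(common), common))
--     return sorted(pairs, key=lambda x: x[2], reverse=True)[:top_n]
-- ===== Notes on version B (the rewrite author's own statement) =====
-- stated objective: alternative
-- what changed: B sorts each article's link set once up front and obtains each pair's shared links as a membership filter of the first article's pre-sorted list while peeling the head off the prepared list, instead of A's indexed nested loops building a fresh set intersection and sorting it per pair.
import Mathlib
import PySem

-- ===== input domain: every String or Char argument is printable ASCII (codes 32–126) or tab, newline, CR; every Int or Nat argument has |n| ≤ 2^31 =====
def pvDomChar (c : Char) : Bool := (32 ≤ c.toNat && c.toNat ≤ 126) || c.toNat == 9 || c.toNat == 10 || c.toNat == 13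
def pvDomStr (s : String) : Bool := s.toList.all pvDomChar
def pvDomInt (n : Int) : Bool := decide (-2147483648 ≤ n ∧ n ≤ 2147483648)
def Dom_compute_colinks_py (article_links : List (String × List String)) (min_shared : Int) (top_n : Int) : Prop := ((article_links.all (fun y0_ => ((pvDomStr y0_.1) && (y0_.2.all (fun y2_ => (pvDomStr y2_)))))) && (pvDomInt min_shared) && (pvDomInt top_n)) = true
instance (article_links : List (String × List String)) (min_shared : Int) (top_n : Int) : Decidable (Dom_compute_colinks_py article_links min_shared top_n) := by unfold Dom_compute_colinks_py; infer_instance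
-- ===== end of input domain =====

-- B pre-sorts each article's link set once and takes each pair's shared links as a membership
-- filter of that sorted list while peeling the head off the prepared list, instead of A's indexed
-- nested loops building and sorting a set intersection per pair; same results, alternative shape.

-- ===== PORT A =====
-- dict[str, set[str]] arrives as an association list; the dict/sets are built as Python does
-- (later duplicate key overwrites in place, sets keep first occurrences).  Python's local
-- 'intersection' is inlined at its three use sites.
def compute_colinks_py (article_links : List (String × List String)) (min_shared : Int) (top_n : Int) : List (String × String × Int × List String) :=
  let d : PySem.Dict String (PySem.Set String) :=
    article_links.foldl (fun d p => d.insert p.1 (PySem.Set.ofList p.2)) PySem.Dict.empty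
  let slugs := d.keys
  let pairs :=
    (PySem.List.enumerate slugs).foldl (fun acc ia =>
      (PySem.List.slice slugs (some (ia.1 + 1)) none).foldl (fun acc b =>
        if min_shared ≤ PySem.Set.len (PySem.Set.inter (d.getD ia.2 []) (d.getD b [])) then
          acc ++ [(ia.2, b, PySem.Set.len (PySem.Set.inter (d.getD ia.2 []) (d.getD b [])),
                   PySem.List.sorted (PySem.Set.inter (d.getD ia.2 []) (d.getD b [])) (fun x => x) false)]
        else acc) acc) []
  PySem.List.slice (PySem.List.sorted pairs (fun x => x.2.2.1) true) none (some top_n)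

-- ===== PORT B =====
-- Source B's sweep: 'prepared.reverse(); while prepared: …prepared.pop(); for … in reversed(prepared)'.
-- Popping the last element of the reversed list is peeling the FIRST remaining article, and
-- reversed(prepared) then runs in original order, so the loop is this head-first recursion.
def pvPairsLoop (ms : Int) : List (String × List String × PySem.Set String) → List (String × String × Int × List String)
  | [] => []
  | (a, sa, _) :: prepared =>
      (prepared.filterMap (fun q =>
        let common := sa.filter (fun link => PySem.Set.contains q.2.2 link)
        if ms ≤ (common.length : Int) then some (a, q.1, (common.length : Int), common) else none))
      ++ pvPairsLoop ms prepared

def compute_colinks_py_alt (article_links : List (String × List String)) (min_shared : Int) (top_n : Int) : List (String × String × Int × List String) :=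
  let d : PySem.Dict String (PySem.Set String) :=
    article_links.foldl (fun d p => d.insert p.1 (PySem.Set.ofList p.2)) PySem.Dict.empty
  let prepared := d.items.map (fun p => (p.1, PySem.List.sorted p.2 (fun x => x) false, p.2))
  PySem.List.slice (PySem.List.sorted (pvPairsLoop min_shared prepared) (fun x => x.2.2.1) true) none (some top_n)

-- ===== PRECONDITION & SPEC =====
def Spec_compute_colinks_py (article_links : List (String × List String)) (min_shared : Int) (top_n : Int) (out : List (String × String × Int × List String)) : Prop := out = compute_colinks_py_alt article_links min_shared top_n
instance (article_links : List (String × List String)) (min_shared : Int) (top_n : Int) (out : List (String × String × Int × List String)) : Decidable (Spec_compute_colinks_py article_links min_shared top_n out) := by unfold Spec_compute_colinks_py; infer_instance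

-- ===== CLAIM (what is proved, stated in full; the proofs are below) =====
def Claim_equal_compute_colinks_py : Prop := ∀ (article_links : List (String × List String)) (min_shared : Int) (top_n : Int), Dom_compute_colinks_py article_links min_shared top_n → Spec_compute_colinks_py article_links min_shared top_n (compute_colinks_py article_links min_shared top_n)

-- ===== LEMMAS AND PROOFS =====

-- common normal form of the pair sweep, a structural recursion over the dict's items
def pvGRec (ms : Int) : List (String × PySem.Set String) → List (String × String × Int × List String)
  | [] => []
  | (a, va) :: rest =>
      (rest.filter (fun q => decide (ms ≤ PySem.Set.len (PySem.Set.inter va q.2)))).map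
        (fun q => (a, q.1, PySem.Set.len (PySem.Set.inter va q.2),
                   PySem.List.sorted (PySem.Set.inter va q.2) (fun x => x) false))
      ++ pvGRec ms rest

lemma pv_filter_map_eq_filterMap {α β : Type} (l : List α) (p : α → Bool) (f : α → β) :
    (l.filter p).map f = l.filterMap (fun x => if p x then some (f x) else none) := by
  induction l with
  | nil => rfl
  | cons a t ih => by_cases h : p a <;> simp [h, ih]

-- sorted intersection of two duplicate-free link sets = membership filter of the sorted first set
lemma pv_inter_sorted_filter (va vb : PySem.Set String) (hva : List.Nodup va) :
    PySem.List.sorted (PySem.Set.inter va vb) (fun x => x) false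
      = (PySem.List.sorted va (fun x => x) false).filter (fun l => PySem.Set.contains vb l) := by
  apply PySem.List.eq_of_perm_of_pairwise_le_of_injective (fun x => x) (fun _ _ h => h)
  · rw [List.perm_ext_iff_of_nodup
      ((PySem.List.sorted_perm _ _ _).nodup_iff.mpr (PySem.Set.nodup_inter va vb hva))
      (List.Nodup.filter _ ((PySem.List.sorted_perm _ _ _).nodup_iff.mpr hva))]
    intro x
    simp [(PySem.List.sorted_perm _ _ _).mem_iff, PySem.Set.mem_inter, List.mem_filter]
  · exact PySem.List.sorted_pairwise _ _
  · exact List.Pairwise.filter _ (PySem.List.sorted_pairwise _ _)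

-- every value stored by the building fold is duplicate-free
lemma pv_values_nodup (al : List (String × List String)) :
    ∀ d : PySem.Dict String (PySem.Set String), (∀ p ∈ d.items, List.Nodup p.2) →
      ∀ p ∈ (al.foldl (fun d p => d.insert p.1 (PySem.Set.ofList p.2)) d).items, List.Nodup p.2 := by
  induction al with
  | nil => intro d h; simpa using h
  | cons x t ih =>
    intro d h
    simp only [List.foldl_cons]
    apply ih
    intro p hp
    rcases (PySem.Dict.mem_items_insert d x.1 (PySem.Set.ofList x.2) p).1 hp with h1 | h2
    · rw [h1]; exact PySem.Set.nodup_ofList x.2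
    · exact h p h2.1

-- B's sweep over the prepared (pre-sorted) items is the normal form
lemma pv_alt_gRec (ms : Int) (l : List (String × PySem.Set String)) (hv : ∀ p ∈ l, List.Nodup p.2) :
    pvPairsLoop ms (l.map (fun p => (p.1, PySem.List.sorted p.2 (fun x => x) false, p.2))) = pvGRec ms l := by
  induction l with
  | nil => rfl
  | cons x t ih =>
    obtain ⟨a, va⟩ := x
    have hva : List.Nodup va := hv (a, va) (List.mem_cons_self)
    simp only [List.map_cons, pvPairsLoop, pvGRec]
    congr 1
    · rw [List.filterMap_map, pv_filter_map_eq_filterMap]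
      apply List.filterMap_congr
      intro q _
      simp only [Function.comp]
      rw [← pv_inter_sorted_filter va q.2 hva]
      simp [PySem.Set.len, (PySem.List.sorted_perm (PySem.Set.inter va q.2) (fun x => x) false).length_eq]
    · exact ih (fun p hp => hv p (List.mem_cons_of_mem _ hp))

-- A's enumerate/slice double loop is the normal form over the dict's items
lemma pv_A_gRec (ms : Int) (d : PySem.Dict String (PySem.Set String)) (hnd : d.keys.Nodup) :
    ∀ (l : List (String × PySem.Set String)) (n : Nat), d.items.drop n = l →
    ∀ acc : List (String × String × Int × List String),
      (PySem.List.enumerate (d.keys.drop n) (n : Int)).foldl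
        (fun acc ia =>
          (PySem.List.slice d.keys (some (ia.1 + 1)) none).foldl (fun acc b =>
            if ms ≤ PySem.Set.len (PySem.Set.inter (d.getD ia.2 []) (d.getD b [])) then
              acc ++ [(ia.2, b, PySem.Set.len (PySem.Set.inter (d.getD ia.2 []) (d.getD b [])),
                       PySem.List.sorted (PySem.Set.inter (d.getD ia.2 []) (d.getD b [])) (fun x => x) false)]
            else acc) acc) acc
      = acc ++ pvGRec ms l := by
  have hkeys : d.keys = d.items.map Prod.fst := rfl
  intro l
  induction l with
  | nil =>
    intro n hdrop acc
    have hk : d.keys.drop n = [] := by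
      rw [hkeys, ← List.map_drop, hdrop]; rfl
    simp [hk, pvGRec]
  | cons x t ih =>
    obtain ⟨a, va⟩ := x
    intro n hdrop acc
    have hmem_a : (a, va) ∈ d.items := List.mem_of_mem_drop (by rw [hdrop]; exact List.mem_cons_self)
    have hmem_t : ∀ q ∈ t, q ∈ d.items := by
      intro q hq
      exact List.mem_of_mem_drop (l := d.items) (i := n) (by rw [hdrop]; exact List.mem_cons_of_mem _ hq)
    have hdrop1 : d.items.drop (n + 1) = t := by
      have h1 := congrArg (List.drop 1) hdrop
      rw [List.drop_drop] at h1
      simpa using h1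
    have hk : d.keys.drop n = a :: t.map Prod.fst := by
      rw [hkeys, ← List.map_drop, hdrop]; rfl
    have hk1 : d.keys.drop (n + 1) = t.map Prod.fst := by
      rw [hkeys, ← List.map_drop, hdrop1]
    have hga : d.getD a [] = va := PySem.Dict.getD_of_mem_items d hmem_a hnd []
    have hcast : (n : Int) + 1 = ((n + 1 : Nat) : Int) := by push_cast; ring
    rw [hk]
    simp only [PySem.List.enumerate, List.foldl_cons]
    rw [hcast, PySem.List.slice_from d.keys (by positivity), Int.toNat_natCast, hk1]
    rw [PySem.List.foldl_append_ite
      (p := fun b => ms ≤ PySem.Set.len (PySem.Set.inter (d.getD a []) (d.getD b [])))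
      (f := fun b => (a, b, PySem.Set.len (PySem.Set.inter (d.getD a []) (d.getD b [])),
        PySem.List.sorted (PySem.Set.inter (d.getD a []) (d.getD b [])) (fun x => x) false))]
    rw [← hk1, ih (n + 1) hdrop1]
    simp only [pvGRec, List.append_assoc]
    congr 2
    rw [hk1, List.filter_map, List.map_map]
    have hfc : ∀ q ∈ t,
        ((fun b => decide (ms ≤ PySem.Set.len (PySem.Set.inter (d.getD a []) (d.getD b [])))) ∘ Prod.fst) q
          = decide (ms ≤ PySem.Set.len (PySem.Set.inter va q.2)) := by
      intro q hq
      have : d.getD q.1 [] = q.2 := PySem.Dict.getD_of_mem_items d (by simpa using hmem_t q hq) hnd []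
      simp [Function.comp, hga, this]
    rw [List.filter_congr hfc]
    apply List.map_congr_left
    intro q hq
    have hqt : q ∈ t := List.mem_of_mem_filter hq
    have : d.getD q.1 [] = q.2 := PySem.Dict.getD_of_mem_items d (by simpa using hmem_t q hqt) hnd []
    simp [Function.comp, hga, this]

-- ===== VERDICT (by name: the statement is the Claim_ definition above) =====
theorem compute_colinks_py_spec : Claim_equal_compute_colinks_py := by
  intro article_links min_shared top_n _hdom
  unfold Spec_compute_colinks_py
  simp only [compute_colinks_py, compute_colinks_py_alt]
  set d : PySem.Dict String (PySem.Set String) :=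
    article_links.foldl (fun d p => d.insert p.1 (PySem.Set.ofList p.2)) PySem.Dict.empty with hd
  have hnd : d.keys.Nodup := by
    exact PySem.Dict.nodup_keys_foldl_insert_key article_links (fun p => p.1)
      (fun _ p => PySem.Set.ofList p.2) PySem.Dict.empty (by simp [show (PySem.Dict.empty : PySem.Dict String (PySem.Set String)).keys = [] from rfl])
  have hval : ∀ p ∈ d.items, List.Nodup p.2 :=
    pv_values_nodup article_links PySem.Dict.empty (by intro p hp; simp [show (PySem.Dict.empty : PySem.Dict String (PySem.Set String)).items = [] from rfl] at hp)
  have hA := pv_A_gRec min_shared d hnd d.items 0 rfl []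
  simp only [List.drop_zero, Nat.cast_zero, List.nil_append] at hA
  rw [hA, pv_alt_gRec min_shared d.items hval]
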